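-- pv_equiv track=rewrite | github.com/SashaKryzh/KPI | 1-й курс/Проектирование алгоритмов - РГР/Динамічне програмування/9.py | func
-- ===== SOURCE A (Python) =====
-- def checkIsland(mat, i, j, N):
--     if i < 0 or i == N or j < 0 or j == N or mat[i][j] == 0:
--         return 0
--
--     mat[i][j] = 0
--
--     return 1 + checkIsland(mat, i + 1, j, N) \
--         + checkIsland(mat, i - 1, j, N) \
--         + checkIsland(mat, i, j + 1, N) \
--         + checkIsland(mat, i, j - 1, N)
--
-- def func(matrix):
--     mat = [line[:] for line in matrix]
--     N = len(mat)
--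
--     max_area = 0
--     count = 0
--
--     for i in range(N):
--         for j in range(N):
--             if mat[i][j] == 1:
--                 area = checkIsland(mat, i, j, N)
--                 max_area = max(max_area, area)
--                 count += 1
--
--     return max_area, count
-- ===== SOURCE B (Python) =====
-- def func(matrix):
--     mat = [row[:] for row in matrix]
--     N = len(mat)
--     max_area = 0
--     count = 0
--     for i in range(N):
--         for j in range(N):
--             if mat[i][j] == 1:
--                 area = 0
--                 stack = [(i, j)]
--                 while stack:
--                     x, y = stack.pop()
--                     if x < 0 or x == N or y < 0 or y == N or mat[x][y] == 0:
--                         continue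
--                     mat[x][y] = 0
--                     area += 1
--                     stack.extend(((x, y - 1), (x, y + 1), (x - 1, y), (x + 1, y)))
--                 max_area = max(max_area, area)
--                 count += 1
--     return max_area, count
-- ===== Notes on version B (the rewrite author's own statement) =====
-- stated objective: alternative
-- what changed: The recursive four-way flood fill (checkIsland, which can hit Python's recursion limit on large islands) is replaced by an iterative flood fill with an explicit stack inside the scan loop.
import Mathlib
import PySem

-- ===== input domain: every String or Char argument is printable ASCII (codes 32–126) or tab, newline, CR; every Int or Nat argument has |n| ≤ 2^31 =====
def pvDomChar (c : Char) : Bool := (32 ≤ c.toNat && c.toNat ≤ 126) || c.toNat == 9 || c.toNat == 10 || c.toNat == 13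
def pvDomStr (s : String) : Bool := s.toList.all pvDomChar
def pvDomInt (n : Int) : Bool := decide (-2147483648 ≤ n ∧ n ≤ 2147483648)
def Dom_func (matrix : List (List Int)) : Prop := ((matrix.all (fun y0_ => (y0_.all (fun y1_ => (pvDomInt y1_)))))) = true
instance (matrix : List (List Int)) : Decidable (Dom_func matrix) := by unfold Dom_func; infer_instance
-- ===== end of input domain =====

-- B replaces A's recursive flood fill by an iterative explicit-stack flood fill (alternative
-- decomposition, same cost); A mutates only its private copy of the matrix, so no observable
-- mutation is involved. Return-value equivalence is proved on square-enough grids (Pre_func).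

-- mat[i][j]; on all inputs admitted by Pre_func every access both ports perform is in range
-- with nonnegative indices, so getD is exact Python indexing there.
def pvGetCell (mat : List (List Int)) (i j : Int) : Int :=
  (mat.getD i.toNat []).getD j.toNat 0

-- mat[i][j] = 0 (functional update)
def pvSetCell (mat : List (List Int)) (i j : Int) : List (List Int) :=
  mat.set i.toNat ((mat.getD i.toNat []).set j.toNat 0)

-- number of nonzero cells (termination measure / fuel bound)
def pvNnz (mat : List (List Int)) : Nat :=
  (mat.map (fun r => (r.filter (fun c => c != 0)).length)).sum

theorem pvRow_set_lt (r : List Int) (b : Nat) (hb : r.getD b 0 ≠ 0) :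
    ((r.set b 0).filter (fun c => c != 0)).length < (r.filter (fun c => c != 0)).length := by
  induction r generalizing b with
  | nil => simp [List.getD] at hb
  | cons c r ih =>
    cases b with
    | zero =>
      simp only [List.getD_cons_zero] at hb
      have hc : (c != 0) = true := by simpa using hb
      simp [List.filter, hc, Nat.lt_succ_iff]
    | succ b =>
      simp only [List.getD_cons_succ] at hb
      have := ih b hb
      simp only [List.set, List.filter]
      split <;> simpa using this

-- zeroing a nonzero cell strictly decreases the nonzero count
theorem pvNnz_set_lt (mat : List (List Int)) (i j : Int) (h : pvGetCell mat i j ≠ 0) :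
    pvNnz (pvSetCell mat i j) < pvNnz mat := by
  unfold pvGetCell at h
  unfold pvSetCell pvNnz
  induction mat generalizing i with
  | nil => simp [List.getD] at h
  | cons r mat ih =>
    by_cases hz : i.toNat = 0
    · simp only [hz, List.getD_cons_zero] at h ⊢
      simp only [List.set, List.map, List.sum_cons]
      exact Nat.add_lt_add_right (pvRow_set_lt r j.toNat h) _
    · obtain ⟨a, ha⟩ : ∃ a, i.toNat = a + 1 := ⟨i.toNat - 1, by omega⟩
      simp only [ha, List.getD_cons_succ] at h
      have := ih (Int.ofNat a) (by simpa using h)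
      simp only [ha, List.set, List.map, List.sum_cons]
      have h2 : (Int.ofNat a).toNat = a := rfl
      rw [h2] at this
      exact Nat.add_lt_add_left this _

-- ===== PORT A =====
-- checkIsland, fueled to totalize the recursion; fuel pvNnz+1 always suffices (each nested
-- nontrivial call zeroes one nonzero cell first), so the port computes exactly A's recursion.
def checkIsland : Nat → List (List Int) → Int → Int → Int → List (List Int) × Int
  | 0, mat, _, _, _ => (mat, 0)
  | f + 1, mat, i, j, N =>
    if i < 0 ∨ i = N ∨ j < 0 ∨ j = N ∨ pvGetCell mat i j = 0 then (mat, 0)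
    else
      let mat1 := pvSetCell mat i j
      let r1 := checkIsland f mat1 (i + 1) j N
      let r2 := checkIsland f r1.1 (i - 1) j N
      let r3 := checkIsland f r2.1 i (j + 1) N
      let r4 := checkIsland f r3.1 i (j - 1) N
      (r4.1, 1 + r1.2 + r2.2 + r3.2 + r4.2)

-- A: the copy `mat = [line[:] for line in matrix]` is the identity on the pure value.
def func (matrix : List (List Int)) : Int × Int :=
  let N : Int := (matrix.length : Int)
  ((PySem.List.pyRange 0 N 1).foldl (fun s i =>
    (PySem.List.pyRange 0 N 1).foldl (fun s j =>
      if pvGetCell s.1 i j = 1 then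
        let r := checkIsland (pvNnz s.1 + 1) s.1 i j N
        (r.1, (max s.2.1 r.2, s.2.2 + 1))
      else s) s) (matrix, ((0 : Int), (0 : Int)))).2

-- ===== PORT B =====
-- the while-stack loop of Source B; list head = Python stack top (pop takes the last pushed cell)
def islandFill (N : Int) : List (List Int) → List (Int × Int) → Int → List (List Int) × Int
  | mat, [], area => (mat, area)
  | mat, (x, y) :: rest, area =>
    if h : x < 0 ∨ x = N ∨ y < 0 ∨ y = N ∨ pvGetCell mat x y = 0 then
      islandFill N mat rest area
    else
      islandFill N (pvSetCell mat x y)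
        ((x + 1, y) :: (x - 1, y) :: (x, y + 1) :: (x, y - 1) :: rest) (area + 1)
  termination_by mat stack _ => (pvNnz mat, stack.length)
  decreasing_by
  · exact Prod.Lex.right _ (by simp)
  · exact Prod.Lex.left _ _ (pvNnz_set_lt _ _ _ (by push_neg at h; exact h.2.2.2.2))

def func_alt (matrix : List (List Int)) : Int × Int :=
  let N : Int := (matrix.length : Int)
  ((PySem.List.pyRange 0 N 1).foldl (fun s i =>
    (PySem.List.pyRange 0 N 1).foldl (fun s j =>
      if pvGetCell s.1 i j = 1 then
        let r := islandFill N s.1 [(i, j)] 0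
        (r.1, (max s.2.1 r.2, s.2.2 + 1))
      else s) s) (matrix, ((0 : Int), (0 : Int)))).2

-- ===== PRECONDITION & SPEC =====
-- Pre_func excludes exactly the inputs on which A (and B alike) raises IndexError: a row
-- shorter than the number of rows N, since both index every column j < N of every row.
def Pre_func (matrix : List (List Int)) : Prop :=
  ∀ row ∈ matrix, matrix.length ≤ row.length
instance (matrix : List (List Int)) : Decidable (Pre_func matrix) := by
  unfold Pre_func; infer_instance

def pvWitness_func : List (List Int) := [[1, 0], [0, 1]]

def Spec_func (matrix : List (List Int)) (out : Int × Int) : Prop := out = func_alt matrix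
instance (matrix : List (List Int)) (out : Int × Int) : Decidable (Spec_func matrix out) := by
  unfold Spec_func; infer_instance

-- ===== CLAIM (what is proved, stated in full; the proofs are below) =====
def Claim_equal_func : Prop :=
  ∀ (matrix : List (List Int)), Dom_func matrix → Pre_func matrix → Spec_func matrix (func matrix)

-- ===== LEMMAS AND PROOFS =====

-- the recursion never increases the number of nonzero cells
theorem checkIsland_nnz_le (f : Nat) :
    ∀ (mat : List (List Int)) (i j N : Int), pvNnz (checkIsland f mat i j N).1 ≤ pvNnz mat := by
  induction f with
  | zero => intro mat i j N; simp [checkIsland]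
  | succ f ih =>
    intro mat i j N
    simp only [checkIsland]
    split
    · exact le_rfl
    · rename_i h
      have h5 : pvGetCell mat i j ≠ 0 := by push_neg at h; exact h.2.2.2.2
      calc pvNnz (checkIsland f (checkIsland f (checkIsland f (checkIsland f
              (pvSetCell mat i j) (i+1) j N).1 (i-1) j N).1 i (j+1) N).1 i (j-1) N).1
          ≤ pvNnz (checkIsland f (checkIsland f (checkIsland f
              (pvSetCell mat i j) (i+1) j N).1 (i-1) j N).1 i (j+1) N).1 := ih _ _ _ _
        _ ≤ pvNnz (checkIsland f (checkIsland f (pvSetCell mat i j) (i+1) j N).1 (i-1) j N).1 :=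
            ih _ _ _ _
        _ ≤ pvNnz (checkIsland f (pvSetCell mat i j) (i+1) j N).1 := ih _ _ _ _
        _ ≤ pvNnz (pvSetCell mat i j) := ih _ _ _ _
        _ ≤ pvNnz mat := le_of_lt (pvNnz_set_lt _ _ _ h5)

-- core bridge: processing the top of the stack iteratively equals one recursive call of A
theorem islandFill_checkIsland (f : Nat) :
    ∀ (mat : List (List Int)) (i j N : Int) (rest : List (Int × Int)) (area : Int),
      pvNnz mat < f →
      islandFill N mat ((i, j) :: rest) area =
        islandFill N (checkIsland f mat i j N).1 rest (area + (checkIsland f mat i j N).2) := by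
  induction f with
  | zero => intro mat i j N rest area h; omega
  | succ f ih =>
    intro mat i j N rest area hf
    rw [islandFill, checkIsland]
    split
    · simp
    · rename_i h
      have h5 : pvGetCell mat i j ≠ 0 := by push_neg at h; exact h.2.2.2.2
      have hm : pvNnz (pvSetCell mat i j) < f := by
        have := pvNnz_set_lt mat i j h5; omega
      have h1 : pvNnz (checkIsland f (pvSetCell mat i j) (i+1) j N).1 < f :=
        lt_of_le_of_lt (checkIsland_nnz_le f _ _ _ _) hm
      have h2 : pvNnz (checkIsland f (checkIsland f (pvSetCell mat i j) (i+1) j N).1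
          (i-1) j N).1 < f := lt_of_le_of_lt (checkIsland_nnz_le f _ _ _ _) h1
      have h3 : pvNnz (checkIsland f (checkIsland f (checkIsland f (pvSetCell mat i j)
          (i+1) j N).1 (i-1) j N).1 i (j+1) N).1 < f :=
        lt_of_le_of_lt (checkIsland_nnz_le f _ _ _ _) h2
      rw [ih _ _ _ _ _ _ hm, ih _ _ _ _ _ _ h1, ih _ _ _ _ _ _ h2, ih _ _ _ _ _ _ h3]
      simp only []
      ring_nf

-- the loop body of B equals the loop body of A
theorem step_eq (N : Int) (s : List (List Int) × Int × Int) (i j : Int) :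
    (if pvGetCell s.1 i j = 1 then
        let r := checkIsland (pvNnz s.1 + 1) s.1 i j N
        (r.1, (max s.2.1 r.2, s.2.2 + 1))
      else s) =
    (if pvGetCell s.1 i j = 1 then
        let r := islandFill N s.1 [(i, j)] 0
        (r.1, (max s.2.1 r.2, s.2.2 + 1))
      else s) := by
  split
  · have := islandFill_checkIsland (pvNnz s.1 + 1) s.1 i j N [] 0 (by omega)
    rw [this, islandFill]
    simp
  · rfl

-- ===== VERDICT (by name: the statement is the Claim_ definition above) =====
theorem func_spec : Claim_equal_func := by
  intro matrix _ _
  show func matrix = func_alt matrix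
  simp only [func, func_alt]
  have hinner : ∀ i : Int, (fun (s : List (List Int) × Int × Int) (j : Int) =>
      if pvGetCell s.1 i j = 1 then
        let r := checkIsland (pvNnz s.1 + 1) s.1 i j (matrix.length : Int)
        (r.1, (max s.2.1 r.2, s.2.2 + 1))
      else s) = (fun (s : List (List Int) × Int × Int) (j : Int) =>
      if pvGetCell s.1 i j = 1 then
        let r := islandFill (matrix.length : Int) s.1 [(i, j)] 0
        (r.1, (max s.2.1 r.2, s.2.2 + 1))
      else s) := by
    intro i; funext s j; exact step_eq _ s i j
  have houter : (fun (s : List (List Int) × Int × Int) (i : Int) =>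
      (PySem.List.pyRange 0 (matrix.length : Int) 1).foldl (fun s j =>
        if pvGetCell s.1 i j = 1 then
          let r := checkIsland (pvNnz s.1 + 1) s.1 i j (matrix.length : Int)
          (r.1, (max s.2.1 r.2, s.2.2 + 1))
        else s) s) = (fun (s : List (List Int) × Int × Int) (i : Int) =>
      (PySem.List.pyRange 0 (matrix.length : Int) 1).foldl (fun s j =>
        if pvGetCell s.1 i j = 1 then
          let r := islandFill (matrix.length : Int) s.1 [(i, j)] 0
          (r.1, (max s.2.1 r.2, s.2.2 + 1))
        else s) s) := by
    funext s i; rw [hinner i]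
  rw [houter]
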